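-- pv_equiv track=rewrite | github.com/LastGenPlayer/Python-Things | recursion 8.02.22.py | ul2
-- ===== SOURCE A (Python) =====
-- def ul2(otsitav, koht, kogus):
--     if koht == [] or kogus < 0:
--         return (kogus == 0)
--     else:
--         if koht[0] == otsitav:
--             return ul2(otsitav, koht[1::], kogus-1)
--         else:
--             return ul2(otsitav, koht[1::], kogus)
-- ===== SOURCE B (Python) =====
-- def ul2(otsitav, koht, kogus):
--     count = 0
--     for x in koht:
--         if x == otsitav:
--             count += 1
--     return count == kogus
-- ===== Notes on version B (the rewrite author's own statement) =====
-- stated objective: faster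
-- what changed: Replaced the head/tail recursion (which slices koht[1:] at every step and decrements kogus on each match) with a single iterative pass accumulating a counter and one final comparison count == kogus.
import Mathlib
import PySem

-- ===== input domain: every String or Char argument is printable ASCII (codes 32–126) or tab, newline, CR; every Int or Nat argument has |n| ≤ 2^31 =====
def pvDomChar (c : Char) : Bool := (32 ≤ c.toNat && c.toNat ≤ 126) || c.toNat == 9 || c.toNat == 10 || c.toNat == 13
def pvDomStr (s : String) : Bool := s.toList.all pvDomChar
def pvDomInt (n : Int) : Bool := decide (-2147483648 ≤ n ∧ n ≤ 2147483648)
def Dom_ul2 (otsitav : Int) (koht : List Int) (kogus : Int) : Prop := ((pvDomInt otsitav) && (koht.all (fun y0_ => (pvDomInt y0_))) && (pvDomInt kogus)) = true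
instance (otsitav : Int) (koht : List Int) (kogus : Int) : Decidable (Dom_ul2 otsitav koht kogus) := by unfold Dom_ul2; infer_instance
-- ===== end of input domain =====

-- B replaces A's recursion with one iterative counting pass and a final comparison (simpler).

-- ===== PORT A =====
-- A: if koht == [] or kogus < 0: return kogus == 0; else recurse on koht[1:] with kogus-1 on a match
def ul2 (otsitav : Int) (koht : List Int) (kogus : Int) : Bool :=
  match koht with
  | [] => decide (kogus = 0)
  | h :: t =>
    if kogus < 0 then decide (kogus = 0)
    else if h = otsitav then ul2 otsitav t (kogus - 1)
    else ul2 otsitav t kogus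

-- ===== PORT B =====
def ul2_alt (otsitav : Int) (koht : List Int) (kogus : Int) : Bool :=
  let count := koht.foldl (fun c x => if x = otsitav then c + 1 else c) (0 : Int)
  decide (count = kogus)

-- ===== PRECONDITION & SPEC =====
def Spec_ul2 (otsitav : Int) (koht : List Int) (kogus : Int) (out : Bool) : Prop := out = ul2_alt otsitav koht kogus
instance (otsitav : Int) (koht : List Int) (kogus : Int) (out : Bool) : Decidable (Spec_ul2 otsitav koht kogus out) := by unfold Spec_ul2; infer_instance

-- ===== CLAIM (what is proved, stated in full; the proofs are below) =====
def Claim_equal_ul2 : Prop := ∀ (otsitav : Int) (koht : List Int) (kogus : Int), Dom_ul2 otsitav koht kogus → Spec_ul2 otsitav koht kogus (ul2 otsitav koht kogus)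

-- ===== LEMMAS AND PROOFS =====

-- the fold with an arbitrary start value c equals c plus the count from 0
theorem ul2_foldl_shift (otsitav : Int) (koht : List Int) (c : Int) :
    koht.foldl (fun c x => if x = otsitav then c + 1 else c) c
      = c + koht.foldl (fun c x => if x = otsitav then c + 1 else c) 0 := by
  induction koht generalizing c with
  | nil => simp
  | cons h t ih =>
    simp only [List.foldl]
    rw [ih, ih (if h = otsitav then 0 + 1 else 0)]
    split_ifs <;> ring

-- the count from 0 is nonnegative
theorem ul2_count_nonneg (otsitav : Int) (koht : List Int) :
    0 ≤ koht.foldl (fun c x => if x = otsitav then c + 1 else c) (0 : Int) := by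
  induction koht with
  | nil => simp
  | cons h t ih =>
    simp only [List.foldl]
    rw [ul2_foldl_shift]
    split_ifs <;> omega

theorem ul2_eq_alt (otsitav : Int) (koht : List Int) (kogus : Int) :
    ul2 otsitav koht kogus = ul2_alt otsitav koht kogus := by
  induction koht generalizing kogus with
  | nil =>
    simp only [ul2, ul2_alt, List.foldl]
    rw [decide_eq_decide]
    omega
  | cons h t ih =>
    simp only [ul2, ul2_alt, List.foldl]
    by_cases hk : kogus < 0
    · -- A returns (kogus == 0) = false here; B's count is ≥ 0 so count = kogus is false too
      have hc := ul2_count_nonneg otsitav t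
      simp only [if_pos hk]
      rw [decide_eq_decide, ul2_foldl_shift]
      split_ifs <;> omega
    · simp only [if_neg hk]
      rw [ih, ih]
      simp only [ul2_alt]
      by_cases hh : h = otsitav
      · simp only [if_pos hh]
        rw [decide_eq_decide, ul2_foldl_shift otsitav t (0 + 1)]
        omega
      · simp [hh]

-- ===== VERDICT (by name: the statement is the Claim_ definition above) =====
theorem ul2_spec : Claim_equal_ul2 := by
  intro o k g _
  unfold Spec_ul2
  exact ul2_eq_alt o k g
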